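-- pv_equiv track=rewrite | github.com/oTree-org/oTree | otree-core-master/otree/management/cli.py | limit_text
-- ===== SOURCE A (Python) =====
-- def limit_text(helptext, limit=80):
--     if len(helptext) <= limit:
--         return helptext
--     limited = helptext
--     while len(limited) > limit - 3:
--         limited = " ".join(limited.split()[:-1])
--     if limited != helptext:
--         limited += "..."
--     return limited
-- ===== SOURCE B (Python) =====
-- def limit_text(helptext, limit=80):
--     if len(helptext) <= limit:
--         return helptext
--     words = helptext.split()
--     acc = 0
--     k = 0
--     for w in words[:-1]:
--         acc += len(w) + 1
--         if acc > limit - 2: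
--             break
--         k += 1
--     return " ".join(words[:k]) + "..."
-- ===== Notes on version B (the rewrite author's own statement) =====
-- stated objective: alternative
-- what changed: A repeatedly splits, drops the last word and rejoins the whole string until it fits; B splits once and makes a single greedy pass over the words with a running length (sum of len(word)+1) to find the cut point, then joins once. Pre_ excludes only limit < 3 with len(helptext) > limit, where A's while loop never terminates.
import Mathlib
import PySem

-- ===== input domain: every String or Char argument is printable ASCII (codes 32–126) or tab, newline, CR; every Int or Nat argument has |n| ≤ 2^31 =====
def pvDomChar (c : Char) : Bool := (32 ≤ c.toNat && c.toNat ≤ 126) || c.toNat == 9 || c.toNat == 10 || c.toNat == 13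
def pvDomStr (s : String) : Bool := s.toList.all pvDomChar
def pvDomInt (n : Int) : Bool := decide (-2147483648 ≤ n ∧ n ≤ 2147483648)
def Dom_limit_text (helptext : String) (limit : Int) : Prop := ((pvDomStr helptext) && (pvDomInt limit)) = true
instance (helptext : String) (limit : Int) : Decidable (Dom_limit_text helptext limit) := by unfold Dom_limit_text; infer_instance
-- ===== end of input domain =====

-- B replaces A's repeated split/drop-last-word/rejoin loop by a single split and one greedy pass over the words with a running length.

-- ===== PORT A =====
-- the 'while len(limited) > limit - 3: limited = " ".join(limited.split()[:-1])' loop;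
-- the fuel (word count + 2) only makes the recursion total: it never runs out on inputs where the Python terminates
def limitTextLoop (limited : List Char) (limit : Int) : Nat → List Char
  | 0 => limited
  | fuel + 1 =>
    if limit - 3 < PySem.Chars.len limited then
      limitTextLoop (PySem.Chars.join [' ']
        (PySem.List.slice (PySem.Chars.split₀ limited) none (some (-1)))) limit fuel
    else limited

def limit_text (helptext : String) (limit : Int) : String :=
  if PySem.Str.len helptext ≤ limit then helptext
  else
    let limited := limitTextLoop helptext.toList limit ((PySem.Chars.split₀ helptext.toList).length + 2)
    if limited ≠ helptext.toList then String.ofList (limited ++ "...".toList)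
    else String.ofList limited

-- ===== PORT B =====
-- 'for w in words[:-1]: acc += len(w) + 1; if acc > limit - 2: break; k += 1'
def altScan : List (List Char) → Int → Int → Nat → Nat
  | [], _, _, k => k
  | w :: rest, limit, acc, k =>
    let acc' := acc + PySem.Chars.len w + 1
    if limit - 2 < acc' then k
    else altScan rest limit acc' (k + 1)

def limit_text_alt (helptext : String) (limit : Int) : String :=
  if PySem.Str.len helptext ≤ limit then helptext
  else
    let ws := PySem.Chars.split₀ helptext.toList
    let k := altScan (PySem.List.slice ws none (some (-1))) limit 0 0
    String.ofList (PySem.Chars.join [' '] (PySem.List.slice ws none (some (k : Int))) ++ "...".toList)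

-- ===== PRECONDITION & SPEC =====
-- Pre_ excludes only inputs on which A DIVERGES: for limit < 3 and len(helptext) > limit the while loop
-- never reaches len(limited) <= limit - 3 (the length bottoms out at 0 > limit - 3), so A loops forever.
def Pre_limit_text (helptext : String) (limit : Int) : Prop :=
  PySem.Str.len helptext ≤ limit ∨ 3 ≤ limit
instance (helptext : String) (limit : Int) : Decidable (Pre_limit_text helptext limit) := by
  unfold Pre_limit_text; infer_instance
def pvWitness_limit_text : String × Int := ("hello world", 8)

def Spec_limit_text (helptext : String) (limit : Int) (out : String) : Prop := out = limit_text_alt helptext limit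
instance (helptext : String) (limit : Int) (out : String) : Decidable (Spec_limit_text helptext limit out) := by unfold Spec_limit_text; infer_instance

-- ===== CLAIM (what is proved, stated in full; the proofs are below) =====
def Claim_equal_limit_text : Prop := ∀ (helptext : String) (limit : Int), Dom_limit_text helptext limit → Pre_limit_text helptext limit → Spec_limit_text helptext limit (limit_text helptext limit)

-- ===== LEMMAS AND PROOFS =====

def pvGood (ws : List (List Char)) : Prop :=
  ∀ w ∈ ws, w ≠ [] ∧ ∀ c ∈ w, PySem.Chars.isspace c = false

theorem pv_go_mem (s : List Char) : ∀ (cur : List Char) (acc : List (List Char)),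
    (∀ c ∈ cur, PySem.Chars.isspace c = false) → pvGood acc →
    pvGood (PySem.Chars.split₀.go s cur acc) := by
  induction s with
  | nil =>
    intro cur acc hcur hacc
    simp only [PySem.Chars.split₀.go]
    split
    · simpa [pvGood] using fun w hw => hacc w hw
    · rename_i h
      intro w hw
      rcases (by simpa using hw : w ∈ acc ∨ w = cur.reverse) with h1 | rfl
      · exact hacc w h1
      · constructor
        · simp [List.isEmpty_iff] at h; simpa using h
        · intro c hc; exact hcur c (by simpa using hc)
  | cons c rest ih =>
    intro cur acc hcur hacc
    simp only [PySem.Chars.split₀.go]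
    split
    · split
      · exact ih [] acc (by simp) hacc
      · rename_i hsp hne
        refine ih [] _ (by simp) ?_
        intro w hw
        rcases List.mem_cons.mp hw with rfl | hw
        · exact ⟨by simp [List.isEmpty_iff] at hne; simpa using hne,
            fun c hc => hcur c (by simpa using hc)⟩
        · exact hacc w hw
    · rename_i hsp
      refine ih (c :: cur) acc ?_ hacc
      intro d hd
      rcases List.mem_cons.mp hd with rfl | hd
      · simpa using hsp
      · exact hcur d hd

theorem pv_split₀_good (s : List Char) : pvGood (PySem.Chars.split₀ s) :=
  pv_go_mem s [] [] (by simp) (by simp [pvGood])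

theorem pv_go_word (w : List Char) : ∀ (s cur : List Char) (acc : List (List Char)),
    (∀ c ∈ w, PySem.Chars.isspace c = false) →
    PySem.Chars.split₀.go (w ++ s) cur acc = PySem.Chars.split₀.go s (w.reverse ++ cur) acc := by
  induction w with
  | nil => intro s cur acc _; simp
  | cons c rest ih =>
    intro s cur acc h
    simp only [List.cons_append, PySem.Chars.split₀.go]
    rw [if_neg (by simpa using h c (by simp))]
    rw [ih s (c :: cur) acc (fun d hd => h d (by simp [hd]))]
    simp

theorem pv_go_join (ws : List (List Char)) : ∀ (acc : List (List Char)), pvGood ws →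
    PySem.Chars.split₀.go (PySem.Chars.join [' '] ws) [] acc = acc.reverse ++ ws := by
  induction ws with
  | nil => intro acc _; simp [PySem.Chars.join_nil, PySem.Chars.split₀.go]
  | cons w rest ih =>
    intro acc hg
    have hw := hg w (by simp)
    cases rest with
    | nil =>
      rw [PySem.Chars.join_singleton, (by simpa using pv_go_word w [] [] acc hw.2 :
        PySem.Chars.split₀.go w [] acc = PySem.Chars.split₀.go [] w.reverse acc)]
      simp only [PySem.Chars.split₀.go]
      rw [if_neg (by simpa [List.isEmpty_iff] using hw.1)]
      simp
    | cons x rest' =>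
      rw [PySem.Chars.join_cons_cons]
      have : w ++ [' '] ++ PySem.Chars.join [' '] (x :: rest')
          = w ++ (' ' :: PySem.Chars.join [' '] (x :: rest')) := by simp
      rw [this, pv_go_word w _ [] acc hw.2]
      simp only [PySem.Chars.split₀.go]
      rw [if_pos (by decide)]
      rw [if_neg (by simpa [List.isEmpty_iff] using hw.1)]
      have h2 : (w.reverse ++ []).reverse = w := by simp
      rw [h2, ih (w :: acc) (fun u hu => hg u (by simp [hu]))]
      simp

theorem pv_split₀_join (ws : List (List Char)) (h : pvGood ws) :
    PySem.Chars.split₀ (PySem.Chars.join [' '] ws) = ws := by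
  have := pv_go_join ws [] h
  simpa [PySem.Chars.split₀] using this

def pvSsum (ws : List (List Char)) : Int := (ws.map (fun w => (w.length : Int) + 1)).sum

def pvMaxK (ws : List (List Char)) (bound : Int) : Nat → Nat
  | 0 => 0
  | j + 1 => if pvSsum (ws.take (j + 1)) ≤ bound then j + 1 else pvMaxK ws bound j

theorem pv_join_length (ws : List (List Char)) (h : ws ≠ []) :
    ((PySem.Chars.join [' '] ws).length : Int) = pvSsum ws - 1 := by
  induction ws with
  | nil => simp at h
  | cons w rest ih =>
    cases rest with
    | nil => simp [PySem.Chars.join_singleton, pvSsum]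
    | cons x rest' =>
      rw [PySem.Chars.join_cons_cons]
      have ih' := ih (by simp)
      simp only [pvSsum, List.map_cons, List.sum_cons] at ih' ⊢
      rw [List.length_append, List.length_append]
      push_cast
      norm_num at ih' ⊢
      linarith

theorem pv_Ssum_nonneg (ws : List (List Char)) : 0 ≤ pvSsum ws := by
  refine List.sum_nonneg ?_
  intro x hx
  simp only [List.mem_map] at hx
  obtain ⟨w, _, rfl⟩ := hx
  positivity

theorem pv_Ssum_mono (ws : List (List Char)) {m k : Nat} (h : m ≤ k) :
    pvSsum (ws.take m) ≤ pvSsum (ws.take k) := by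
  have h2 : ws.take k = ws.take m ++ (ws.take k).drop m := by
    conv_lhs => rw [← List.take_append_drop m (ws.take k)]
    rw [List.take_take, Nat.min_eq_left h]
  have hnn := pv_Ssum_nonneg ((ws.take k).drop m)
  rw [h2]
  unfold pvSsum at hnn ⊢
  rw [List.map_append, List.sum_append]
  linarith

theorem pv_maxK_le (ws : List (List Char)) (bound : Int) (j : Nat) : pvMaxK ws bound j ≤ j := by
  induction j with
  | zero => simp [pvMaxK]
  | succ j ih => simp only [pvMaxK]; split <;> omega

theorem pv_Ssum_maxK_le (ws : List (List Char)) {bound : Int} (h0 : 0 ≤ bound) (j : Nat) :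
    pvSsum (ws.take (pvMaxK ws bound j)) ≤ bound := by
  induction j with
  | zero => simpa [pvMaxK, pvSsum] using h0
  | succ j ih =>
    simp only [pvMaxK]
    split
    · assumption
    · exact ih

theorem pv_maxK_ge (ws : List (List Char)) (bound : Int) (j : Nat) :
    ∀ m ≤ j, pvSsum (ws.take m) ≤ bound → m ≤ pvMaxK ws bound j := by
  induction j with
  | zero => intro m hm _; omega
  | succ j ih =>
    intro m hm hS
    simp only [pvMaxK]
    split
    · omega
    · rename_i hc
      rcases Nat.lt_or_ge m (j + 1) with h | h
      · exact ih m (by omega) hS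
      · exact absurd hS (by rw [(by omega : m = j + 1)] at hS ⊢; exact absurd hS hc)



theorem pv_loop_eq (ws : List (List Char)) (hg : pvGood ws) (limit : Int) (hl : 3 ≤ limit) :
    ∀ (j : Nat), j ≤ ws.length → ∀ (fuel : Nat), j + 1 ≤ fuel →
    limitTextLoop (PySem.Chars.join [' '] (ws.take j)) limit fuel
      = PySem.Chars.join [' '] (ws.take (pvMaxK ws (limit - 2) j)) := by
  intro j
  induction j with
  | zero =>
    intro _ fuel hf
    obtain ⟨f, rfl⟩ : ∃ f, fuel = f + 1 := ⟨fuel - 1, by omega⟩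
    simp only [List.take_zero, PySem.Chars.join_nil, limitTextLoop, PySem.Chars.len_eq]
    rw [if_neg (by simp; omega)]
    simp [pvMaxK]
  | succ j' ih =>
    intro hj fuel hf
    obtain ⟨f, rfl⟩ : ∃ f, fuel = f + 1 := ⟨fuel - 1, by omega⟩
    have htk : (ws.take (j' + 1)) ≠ [] := by
      have hlt : (ws.take (j' + 1)).length = j' + 1 := by rw [List.length_take]; omega
      intro h; rw [h] at hlt; simp at hlt
    have hlen := pv_join_length (ws.take (j' + 1)) htk
    simp only [limitTextLoop, PySem.Chars.len_eq]
    by_cases hS : pvSsum (ws.take (j' + 1)) ≤ limit - 2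
    · rw [if_neg (show ¬ (limit - 3 < ((PySem.Chars.join [' '] (ws.take (j' + 1))).length : Int))
        by rw [hlen]; omega)]
      simp only [pvMaxK]
      rw [if_pos hS]
    · rw [if_pos (show limit - 3 < ((PySem.Chars.join [' '] (ws.take (j' + 1))).length : Int)
        by rw [hlen]; omega)]
      have hgt : pvGood (ws.take (j' + 1)) := fun w hw => hg w ((List.take_sublist _ _).subset hw)
      rw [pv_split₀_join _ hgt, PySem.List.slice_to_neg_one]
      have hdl : (ws.take (j' + 1)).dropLast = ws.take j' := by
        rw [List.dropLast_eq_take, List.length_take, List.take_take]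
        congr 1
        omega
      rw [hdl, ih (by omega) f (by omega)]
      simp only [pvMaxK]
      rw [if_neg hS]

theorem pv_altScan_spec : ∀ (l : List (List Char)) (limit acc : Int) (k : Nat), acc ≤ limit - 2 →
    ∃ c, altScan l limit acc k = k + c ∧ c ≤ l.length ∧ acc + pvSsum (l.take c) ≤ limit - 2 ∧
      (c < l.length → limit - 2 < acc + pvSsum (l.take (c + 1))) := by
  intro l
  induction l with
  | nil =>
    intro limit acc k hacc
    exact ⟨0, by simp [altScan], by simp, by simpa [pvSsum] using hacc, by simp⟩
  | cons w rest ih =>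
    intro limit acc k hacc
    simp only [altScan, PySem.Chars.len_eq]
    by_cases hc : limit - 2 < acc + (w.length : Int) + 1
    · refine ⟨0, by rw [if_pos hc]; omega, by simp, by simpa [pvSsum] using hacc, ?_⟩
      intro _
      simp only [List.take_succ_cons, List.take_zero, pvSsum, List.map_cons, List.map_nil,
        List.sum_cons, List.sum_nil]
      omega
    · rw [if_neg hc]
      obtain ⟨c', h1, h2, h3, h4⟩ := ih limit (acc + (w.length : Int) + 1) (k + 1) (by omega)
      refine ⟨c' + 1, by rw [h1]; omega, by simpa using h2, ?_, ?_⟩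
      · simp only [List.take_succ_cons, pvSsum, List.map_cons, List.sum_cons] at h3 ⊢
        omega
      · intro hlt
        have := h4 (by simpa using hlt)
        simp only [List.take_succ_cons, pvSsum, List.map_cons, List.sum_cons] at this ⊢
        omega



theorem pv_glue (helptext : String) (limit : Int)
    (hpre : PySem.Str.len helptext ≤ limit ∨ 3 ≤ limit) :
    limit_text helptext limit = limit_text_alt helptext limit := by
  by_cases hle : PySem.Str.len helptext ≤ limit
  · simp only [limit_text, limit_text_alt, if_pos hle]
  · have hl : 3 ≤ limit := hpre.resolve_left hle
    have hlen_t : limit < (helptext.toList.length : Int) := by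
      rw [PySem.Str.len_eq] at hle; omega
    simp only [limit_text, limit_text_alt, if_neg hle]
    have hgood : pvGood (PySem.Chars.split₀ helptext.toList) := pv_split₀_good _
    generalize hws : PySem.Chars.split₀ helptext.toList = ws at *
    generalize hn : ws.length = n at *
    -- A's first loop iteration: helptext itself is too long, drop the last word
    have step1 : limitTextLoop helptext.toList limit (n + 2)
        = limitTextLoop (PySem.Chars.join [' '] (ws.take (n - 1))) limit (n + 1) := by
      show limitTextLoop helptext.toList limit ((n + 1) + 1) = _
      simp only [limitTextLoop, PySem.Chars.len_eq]
      rw [if_pos (by omega)]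
      rw [hws, PySem.List.slice_to_neg_one, List.dropLast_eq_take, hn]
    have hA : limitTextLoop helptext.toList limit (n + 2)
        = PySem.Chars.join [' '] (ws.take (pvMaxK ws (limit - 2) (n - 1))) := by
      rw [step1, pv_loop_eq ws hgood limit hl (n - 1) (by omega) (n + 1) (by omega)]
    generalize hK : pvMaxK ws (limit - 2) (n - 1) = K at *
    have hKle : K ≤ n - 1 := by rw [← hK]; exact pv_maxK_le ws _ _
    have hKlen : ((PySem.Chars.join [' '] (ws.take K)).length : Int) ≤ limit - 3 := by
      rcases Nat.eq_zero_or_pos K with rfl | hKpos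
      · simp [PySem.Chars.join_nil]; omega
      · have htk : ws.take K ≠ [] := by
          have hlt : (ws.take K).length = K := by rw [List.length_take]; omega
          intro h; rw [h] at hlt; simp at hlt; omega
        rw [pv_join_length _ htk]
        have := pv_Ssum_maxK_le ws (show (0:Int) ≤ limit - 2 by omega) (n - 1)
        rw [hK] at this
        omega
    have hne : limitTextLoop helptext.toList limit (n + 2) ≠ helptext.toList := by
      rw [hA]
      intro h
      have : ((PySem.Chars.join [' '] (ws.take K)).length : Int) = (helptext.toList.length : Int) := by
        rw [h]
      omega
    rw [if_pos hne, hA]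
    -- B's scan
    rw [PySem.List.slice_to_neg_one]
    obtain ⟨c, hc1, hc2, hc3, hc4⟩ :=
      pv_altScan_spec ws.dropLast limit 0 0 (by omega)
    have htake : ∀ m, m ≤ n - 1 → ws.dropLast.take m = ws.take m := by
      intro m hm
      rw [List.dropLast_eq_take, List.take_take, hn]
      congr 1
      omega
    rw [List.length_dropLast, hn] at hc2 hc4
    rw [htake c hc2, zero_add] at hc3
    have hcK : c = K := by
      have h1 : c ≤ K := by rw [← hK]; exact pv_maxK_ge ws _ _ c hc2 hc3
      have h2 : K ≤ c := by
        by_contra hcon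
        push Not at hcon
        have hcl := hc4 (by omega)
        rw [htake (c + 1) (by omega), zero_add] at hcl
        have hmono := pv_Ssum_mono ws (show c + 1 ≤ K by omega)
        have hSK := pv_Ssum_maxK_le ws (show (0:Int) ≤ limit - 2 by omega) (n - 1)
        rw [hK] at hSK
        omega
      omega
    rw [hc1, zero_add, hcK, PySem.List.slice_to_natCast]

-- ===== VERDICT (by name: the statement is the Claim_ definition above) =====
theorem limit_text_spec : Claim_equal_limit_text := by
  intro helptext limit _ hpre
  unfold Spec_limit_text
  exact pv_glue helptext limit hpre
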